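-- pv_equiv track=rewrite | github.com/SKantar/InterviewBit | 07_DynamicProgramming/flip_array.py | solve
-- ===== SOURCE A (Python) =====
-- def solve(A):
--     s, n = sum(A) // 2 + 1, len(A) + 1
--
--     dp = [[i and float('inf') or 0] * (n) for i in range(s)]
--
--     for i in range(s):
--         for j in range(1, n):
--             if i - A[j - 1] >= 0:
--                 dp[i][j] = min(dp[i][j - 1], dp[i - A[j - 1]][j - 1] + 1)
--             else:
--                 dp[i][j] = dp[i][j - 1]
--
--     for row in dp[::-1]:
--         if row[-1] < float('inf'):
--             return row[-1]
--     return None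
-- ===== SOURCE B (Python) =====
-- def solve(A):
--     s = sum(A) // 2 + 1
--     if s <= 0:
--         return None
--     reach = {0: 0}
--     for a in A:
--         nxt = dict(reach)
--         for t, c in reach.items():
--             u = t + a
--             if u < s and (u not in nxt or c + 1 < nxt[u]):
--                 nxt[u] = c + 1
--         reach = nxt
--     return reach[max(reach)]
-- ===== Notes on version B (the rewrite author's own statement) =====
-- stated objective: alternative
-- what changed: B abandons A's dense s-by-(n+1) table over every sum 0..s-1 and instead maintains a sparse dict mapping only the REACHABLE subset sums (< s) to their minimal flip count, extending it forward (t -> t+a) once per element, and returns reach[max(reach)] instead of scanning reversed table rows for the first finite last column.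
import Mathlib
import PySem

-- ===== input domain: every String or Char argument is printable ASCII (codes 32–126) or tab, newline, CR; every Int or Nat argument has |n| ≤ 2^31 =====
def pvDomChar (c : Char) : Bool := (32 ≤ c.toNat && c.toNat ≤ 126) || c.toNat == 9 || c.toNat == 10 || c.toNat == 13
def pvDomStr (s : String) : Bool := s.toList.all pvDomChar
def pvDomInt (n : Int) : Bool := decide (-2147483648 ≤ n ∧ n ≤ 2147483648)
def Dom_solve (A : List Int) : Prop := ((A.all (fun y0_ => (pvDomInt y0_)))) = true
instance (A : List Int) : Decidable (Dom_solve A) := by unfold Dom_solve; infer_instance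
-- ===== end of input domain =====

-- B replaces A's dense s×(n+1) table with a sparse dict of reachable sums → min flips and
-- returns the value at the largest key; return values agree on Pre_solve.

-- ===== PORT A =====
-- Python's min over {int, float('inf')}: none stands for float('inf').
def pymin : Option Int → Option Int → Option Int
  | none, y => y
  | some x, none => some x
  | some x, some y => some (min x y)

-- row[-1] ; rows of dp always have length len(A)+1 ≥ 1, so the default is unreachable
def solveRowLast (row : List (Option Int)) : Option Int :=
  PySem.List.pyGetD row (-1) none

-- 'for row in dp[::-1]: if row[-1] < float('inf'): return row[-1]' / 'return None'
def solveScanRows : List (List (Option Int)) → Option Int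
  | [] => none
  | row :: rest =>
    match solveRowLast row with
    | some v => some v
    | none => solveScanRows rest

-- the body of A's inner loop: one assignment dp[i][j] = … ; the table of rows is kept as an Array
-- (Python's list of rows, O(1) index/assign). i ∈ range(s) is nonnegative, j-1 ∈ range(len(A)) is in
-- range, and — inside Pre_solve — 0 ≤ i - A[j-1] < s, so the Nat conversions and getD defaults are
-- exact; outside Pre_solve Python raises IndexError on dp[i - A[j-1]] and those inputs are excluded.
def solveBody (A : List Int) (dp : Array (List (Option Int))) (i j : Int) : Array (List (Option Int)) :=
  let a := PySem.List.pyGetD A (j - 1) 0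
  let rowi := dp.getD i.toNat []
  let cur := PySem.List.pyGetD rowi (j - 1) none
  let v := if 0 ≤ i - a then
      pymin cur ((PySem.List.pyGetD (dp.getD (i - a).toNat []) (j - 1) none).map (· + 1))
    else cur
  dp.setIfInBounds i.toNat (rowi.set j.toNat v)

def solve (A : List Int) : Option Int :=
  let s : Int := PySem.Int.floordiv A.sum 2 + 1
  let n : Int := (A.length : Int) + 1
  -- dp = [[i and float('inf') or 0] * n for i in range(s)]
  let dp0 : Array (List (Option Int)) :=
    ((PySem.List.pyRange 0 s).map (fun i => List.replicate n.toNat (if i = 0 then some 0 else none))).toArray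
  let dp := (PySem.List.pyRange 0 s).foldl (fun dp i =>
    (PySem.List.pyRange 1 n).foldl (fun dp j => solveBody A dp i j) dp) dp0
  solveScanRows ((PySem.List.slice? dp.toList none none (-1)).getD [])   -- dp[::-1]

-- ===== PORT B =====
-- the body of B's inner loop over reach.items(): one conditional dict update
def bStep (s a : Int) (nxt : PySem.Dict Int Int) (tc : Int × Int) : PySem.Dict Int Int :=
  -- u = t + c; if u < s and (u not in nxt or c + 1 < nxt[u]): nxt[u] = c + 1
  if tc.1 + a < s ∧ (nxt.contains (tc.1 + a) = false ∨ tc.2 + 1 < nxt.getD (tc.1 + a) 0) then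
    nxt.insert (tc.1 + a) (tc.2 + 1)
  else nxt

def solve_alt (A : List Int) : Option Int :=
  let s : Int := PySem.Int.floordiv A.sum 2 + 1
  if s ≤ 0 then none
  else
    -- reach = {0: 0}; for a in A: nxt = dict(reach); for t, c in reach.items(): …; reach = nxt
    let reach := A.foldl (fun reach a => reach.items.foldl (bStep s a) reach)
      (PySem.Dict.empty.insert 0 0)
    -- return reach[max(reach)]  (0 is always a key, so max exists and the lookup succeeds)
    (PySem.List.max? reach.keys (fun x => x)).bind (fun m => reach.get? m)

-- ===== PRECONDITION & SPEC =====
-- Pre_solve is exactly where A returns: with a negative element and nonnegative sum, A raises IndexError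
-- (dp[i - A[j-1]] with i - A[j-1] ≥ s); with sum < 0 the table is empty and A returns None.
def Pre_solve (A : List Int) : Prop := (∀ a ∈ A, 0 ≤ a) ∨ A.sum < 0
instance (A : List Int) : Decidable (Pre_solve A) := by unfold Pre_solve; infer_instance
def pvWitness_solve : List Int := [1, 2, 3]

def Spec_solve (A : List Int) (out : Option Int) : Prop := out = solve_alt A
instance (A : List Int) (out : Option Int) : Decidable (Spec_solve A out) := by unfold Spec_solve; infer_instance

-- ===== CLAIM (what is proved, stated in full; the proofs are below) =====
def Claim_equal_solve : Prop := ∀ (A : List Int), Dom_solve A → Pre_solve A → Spec_solve A (solve A)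

-- ===== LEMMAS AND PROOFS =====

-- proof-side views of the computation
def entryV (v : List (Option Int)) (r : Nat) : Option Int := v.getD r none
def entryT (dp : List (List (Option Int))) (r c : Nat) : Option Int := (dp.getD r []).getD c none
-- proof-side: A's update rule for one cell, as a function of the previous column vector
def pickP (prev : List (Option Int)) (s i a : Int) : Option Int :=
  let c := PySem.List.pyGetD prev i none
  let j := i - a
  if 0 ≤ j ∧ j < s then
    match PySem.List.pyGetD prev j none with
    | some pj =>
      match c with
      | none => some (pj + 1)
      | some cv => some (min cv (pj + 1))
    | none => c
  else c

-- proof-side twin of solveBody over a plain list of rows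
def solveBodyL (A : List Int) (dp : List (List (Option Int))) (i j : Int) : List (List (Option Int)) :=
  let a := PySem.List.pyGetD A (j - 1) 0
  let rowi := dp.getD i.toNat []
  let cur := PySem.List.pyGetD rowi (j - 1) none
  let v := if 0 ≤ i - a then
      pymin cur ((PySem.List.pyGetD (dp.getD (i - a).toNat []) (j - 1) none).map (· + 1))
    else cur
  dp.set i.toNat (rowi.set j.toNat v)

lemma getD_toList (arr : Array (List (Option Int))) (i : Nat) (d : List (Option Int)) :
    arr.getD i d = arr.toList.getD i d := by
  unfold Array.getD
  split
  · rw [List.getD_eq_getElem?_getD,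
      List.getElem?_eq_getElem (by simpa using ‹i < arr.size›), Option.getD_some]
    exact (Array.getElem_toList _).symm
  · rw [List.getD_eq_getElem?_getD,
      List.getElem?_eq_none (by simpa using Nat.le_of_not_lt ‹¬ i < arr.size›)]
    rfl

lemma toList_solveBody (A : List Int) (dp : Array (List (Option Int))) (i j : Int) :
    (solveBody A dp i j).toList = solveBodyL A dp.toList i j := by
  simp only [solveBody, solveBodyL, Array.toList_setIfInBounds, getD_toList]

lemma toList_foldl_bridge {γ : Type} (f : Array (List (Option Int)) → γ → Array (List (Option Int)))
    (g : List (List (Option Int)) → γ → List (List (Option Int)))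
    (h : ∀ dp x, (f dp x).toList = g dp.toList x) :
    ∀ (l : List γ) (dp : Array (List (Option Int))), (l.foldl f dp).toList = l.foldl g dp.toList
  | [], _ => rfl
  | x :: t, dp => by
    rw [List.foldl_cons, List.foldl_cons, toList_foldl_bridge f g h t, h]

def stepN (s : Nat) (v : List (Option Int)) (a : Int) : List (Option Int) :=
  (List.range s).map (fun i : Nat => pickP v (s : Int) (Int.ofNat i) a)
def vinit (s : Nat) : List (Option Int) := (List.range s).map (fun i => if i = 0 then some 0 else none)
def WP (A : List Int) (s c : Nat) : List (Option Int) := (A.take c).foldl (stepN s) (vinit s)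

lemma length_stepN (s : Nat) (v : List (Option Int)) (a : Int) : (stepN s v a).length = s := by
  simp [stepN]

lemma length_vinit (s : Nat) : (vinit s).length = s := by simp [vinit]

lemma length_foldl_stepN (s : Nat) : ∀ (l : List Int) (v : List (Option Int)),
    v.length = s → (l.foldl (stepN s) v).length = s
  | [], _, h => h
  | _ :: t, v, _ => length_foldl_stepN s t _ (length_stepN s v _)

lemma length_WP (A : List Int) (s c : Nat) : (WP A s c).length = s :=
  length_foldl_stepN s (A.take c) (vinit s) (length_vinit s)

lemma entryV_stepN (s : Nat) (v : List (Option Int)) (a : Int) (r : Nat) (hr : r < s) :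
    entryV (stepN s v a) r = pickP v (s : Int) (r : Int) a := by
  unfold entryV stepN
  rw [List.getD_eq_getElem?_getD, List.getElem?_map, List.getElem?_range hr]
  rfl

lemma entryV_vinit (s r : Nat) (hr : r < s) :
    entryV (vinit s) r = (if r = 0 then some 0 else none) := by
  unfold entryV vinit
  rw [List.getD_eq_getElem?_getD, List.getElem?_map, List.getElem?_range hr]
  rfl

lemma pickP_char (v : List (Option Int)) (s r : Nat) (a : Int) (_hv : v.length = s)
    (ha : 0 ≤ a) (hr : r < s) :
    pickP v (s : Int) (r : Int) a =
      if 0 ≤ (r : Int) - a then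
        pymin (entryV v r) ((entryV v ((r : Int) - a).toNat).map (· + 1))
      else entryV v r := by
  unfold pickP
  by_cases hc : 0 ≤ (r : Int) - a
  · have hlt : (r : Int) - a < (s : Int) := by
      have : (r : Int) < (s : Int) := by exact_mod_cast hr
      omega
    rw [if_pos ⟨hc, hlt⟩, if_pos hc, PySem.List.pyGetD_natCast,
      PySem.List.pyGetD_of_nonneg v none hc]
    cases hp : v[((r : Int) - a).toNat]?.getD none <;> cases hcur : v[r]?.getD none <;>
      simp [entryV, pymin, List.getD_eq_getElem?_getD, hp, hcur]
  · have h2 : ¬ (0 ≤ (r : Int) - a ∧ (r : Int) - a < (s : Int)) := fun h => hc h.1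
    rw [if_neg h2, if_neg hc, PySem.List.pyGetD_natCast]
    rfl

lemma WP_zero (A : List Int) (s : Nat) : WP A s 0 = vinit s := by simp [WP]

lemma WP_succ (A : List Int) (s c : Nat) (hc : c < A.length) :
    WP A s (c + 1) = stepN s (WP A s c) (A.getD c 0) := by
  unfold WP
  rw [List.take_add_one, List.getElem?_eq_getElem hc, Option.toList_some, List.foldl_append]
  simp [List.getD_eq_getElem?_getD, List.getElem?_eq_getElem hc]

-- fold over List.range with a positional invariant
lemma foldlRangeInv {β : Type} (P : Nat → β → Prop) (f : β → Nat → β) :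
    ∀ (L : Nat) (b : β), P 0 b → (∀ m b', m < L → P m b' → P (m + 1) (f b' m)) →
      P L ((List.range L).foldl f b) := by
  intro L
  induction L with
  | zero => intro b h0 _; simp only [List.range_zero, List.foldl_nil]; exact h0
  | succ L ih =>
    intro b h0 hstep
    rw [List.range_succ, List.foldl_append]
    exact hstep L _ (Nat.lt_succ_self L)
      (ih b h0 (fun m b' hm h => hstep m b' (Nat.lt_succ_of_lt hm) h))

-- outer-loop invariant: rows < k are final, rows ≥ k untouched
def InvT (A : List Int) (sN k : Nat) (dp : List (List (Option Int))) : Prop :=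
  dp.length = sN ∧
  (∀ r, r < sN → (dp.getD r []).length = A.length + 1) ∧
  (∀ r, r < k → r < sN → ∀ c, c ≤ A.length → entryT dp r c = entryV (WP A sN c) r) ∧
  (∀ r, k ≤ r → r < sN → dp.getD r [] = List.replicate (A.length + 1) (if r = 0 then some 0 else none))

-- inner-loop invariant while row k is being filled up to column m
def InvInner (A : List Int) (sN k m : Nat) (dp : List (List (Option Int))) : Prop :=
  dp.length = sN ∧
  (∀ r, r < sN → (dp.getD r []).length = A.length + 1) ∧
  (∀ r, r < k → r < sN → ∀ c, c ≤ A.length → entryT dp r c = entryV (WP A sN c) r) ∧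
  (∀ r, k < r → r < sN → dp.getD r [] = List.replicate (A.length + 1) (if r = 0 then some 0 else none)) ∧
  (∀ c, c ≤ m → entryT dp k c = entryV (WP A sN c) k) ∧
  (∀ c, m < c → c ≤ A.length → entryT dp k c = (if k = 0 then some 0 else none))

lemma getD_set_self {α : Type} (l : List α) (i : Nat) (x d : α) (h : i < l.length) :
    (l.set i x).getD i d = x := by
  simp [List.getD_eq_getElem?_getD, h]

lemma getD_set_ne {α : Type} (l : List α) (i j : Nat) (x d : α) (h : i ≠ j) :
    (l.set i x).getD j d = l.getD j d := by
  simp [List.getD_eq_getElem?_getD, h]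

lemma inner_step (A : List Int) (h0 : ∀ a ∈ A, 0 ≤ a) (sN k m : Nat) (hk : k < sN)
    (hm : m < A.length) (dp : List (List (Option Int))) (h : InvInner A sN k m dp) :
    InvInner A sN k (m + 1) (solveBodyL A dp (k : Int) (1 + (m : Int))) := by
  obtain ⟨h1, h2, h3, h4, h5, h6⟩ := h
  have hklen : k < dp.length := h1 ▸ hk
  have hrowlen : (dp.getD k []).length = A.length + 1 := h2 k hk
  have ha : 0 ≤ A.getD m 0 := by
    have hmem : A.getD m 0 ∈ A := by
      rw [List.getD_eq_getElem?_getD, List.getElem?_eq_getElem hm]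
      exact List.getElem_mem hm
    exact h0 _ hmem
  -- name the pieces of solveBodyL
  simp only [solveBodyL]
  have hidx : (1 : Int) + (m : Int) - 1 = (m : Int) := by ring
  have htoN1 : ((k : Int)).toNat = k := by simp
  have htoN2 : ((1 : Int) + (m : Int)).toNat = m + 1 := by omega
  rw [hidx, htoN1, htoN2, PySem.List.pyGetD_natCast A m 0]
  set a := A.getD m 0 with hadef
  set rowi := dp.getD k [] with hrowdef
  rw [PySem.List.pyGetD_natCast rowi m none]
  -- the written value equals the spec entry
  have hWlen : (WP A sN m).length = sN := length_WP A sN m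
  have hcur : rowi.getD m none = entryV (WP A sN m) k := h5 m le_rfl
  have hveq :
      (if 0 ≤ (k : Int) - a then
        pymin (rowi.getD m none)
          ((PySem.List.pyGetD (dp.getD ((k : Int) - a).toNat []) (m : Int) none).map (· + 1))
      else rowi.getD m none) = entryV (WP A sN (m + 1)) k := by
    rw [WP_succ A sN m hm, ← hadef, entryV_stepN sN (WP A sN m) a k hk]
    rw [pickP_char (WP A sN m) sN k a hWlen ha hk]
    by_cases hc : 0 ≤ (k : Int) - a
    · rw [if_pos hc, if_pos hc, hcur]
      have hk'le : ((k : Int) - a).toNat ≤ k := by omega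
      have hk'lt : ((k : Int) - a).toNat < sN := lt_of_le_of_lt hk'le hk
      rw [PySem.List.pyGetD_natCast]
      have hprev : (dp.getD ((k : Int) - a).toNat []).getD m none
          = entryV (WP A sN m) ((k : Int) - a).toNat := by
        rcases Nat.lt_or_ge ((k : Int) - a).toNat k with hlt | hge
        · exact h3 _ hlt hk'lt m (Nat.le_of_lt hm)
        · have : ((k : Int) - a).toNat = k := le_antisymm hk'le hge
          rw [this]
          exact h5 m le_rfl
      rw [hprev]
    · rw [if_neg hc, if_neg hc, hcur]
  rw [hveq]
  set v := entryV (WP A sN (m + 1)) k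
  refine ⟨by simpa using h1, ?_, ?_, ?_, ?_, ?_⟩
  · intro r hr
    rcases eq_or_ne r k with rfl | hne
    · rw [getD_set_self dp r _ [] hklen]
      simp [hrowlen]
    · rw [getD_set_ne dp k r _ [] (fun h => hne h.symm)]
      exact h2 r hr
  · intro r hrk hrs c hc
    unfold entryT
    rw [getD_set_ne dp k r _ [] (by omega)]
    exact h3 r hrk hrs c hc
  · intro r hrk hrs
    rw [getD_set_ne dp k r _ [] (by omega)]
    exact h4 r hrk hrs
  · intro c hc
    unfold entryT
    rw [getD_set_self dp k _ [] hklen]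
    rcases Nat.lt_or_ge c (m + 1) with hlt | hge
    · rw [getD_set_ne rowi (m + 1) c _ none (by omega)]
      exact h5 c (by omega)
    · have : c = m + 1 := by omega
      subst this
      rw [getD_set_self rowi (m + 1) _ none (by omega)]
  · intro c hc1 hc2
    unfold entryT
    rw [getD_set_self dp k _ [] hklen, getD_set_ne rowi (m + 1) c _ none (by omega)]
    exact h6 c (by omega) hc2

lemma inner_start (A : List Int) (sN k : Nat) (hk : k < sN) (dp : List (List (Option Int)))
    (h : InvT A sN k dp) : InvInner A sN k 0 dp := by
  obtain ⟨h1, h2, h3, h4⟩ := h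
  have hrow : dp.getD k [] = List.replicate (A.length + 1) (if k = 0 then some 0 else none) :=
    h4 k le_rfl hk
  refine ⟨h1, h2, h3, fun r hr hrs => h4 r (Nat.le_of_lt hr) hrs, ?_, ?_⟩
  · intro c hc
    interval_cases c
    unfold entryT
    rw [hrow, List.getD_replicate _ (by omega), WP_zero, entryV_vinit sN k hk]
  · intro c hc1 hc2
    unfold entryT
    rw [hrow, List.getD_replicate _ (by omega)]

lemma inner_finish (A : List Int) (sN k : Nat) (hk : k < sN) (dp : List (List (Option Int)))
    (h : InvInner A sN k A.length dp) : InvT A sN (k + 1) dp := by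
  obtain ⟨h1, h2, h3, h4, h5, h6⟩ := h
  refine ⟨h1, h2, ?_, fun r hr hrs => h4 r (by omega) hrs⟩
  intro r hr hrs c hc
  rcases Nat.lt_or_ge r k with hlt | hge
  · exact h3 r hlt hrs c hc
  · have : r = k := by omega
    subst this
    exact h5 c hc

lemma scanRows_eq (l : List (List (Option Int))) :
    solveScanRows l = (l.map solveRowLast).findSome? id := by
  induction l with
  | nil => rfl
  | cons row rest ih =>
    simp only [solveScanRows, List.map_cons, List.findSome?_cons]
    cases solveRowLast row <;> simp [ih]

lemma rowLast_eq (row : List (Option Int)) (L : Nat) (hL : row.length = L + 1) :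
    solveRowLast row = row.getD L none := by
  simp [solveRowLast, PySem.List.pyGetD, PySem.List.pyGet?, PySem.List.pyIdx?, hL,
    List.getD_eq_getElem?_getD]

lemma solveA_eq (A : List Int) (h0 : ∀ a ∈ A, 0 ≤ a)
    (hs0 : 0 ≤ PySem.Int.floordiv A.sum 2 + 1) :
    solve A = ((WP A (PySem.Int.floordiv A.sum 2 + 1).toNat A.length).reverse).findSome? id := by
  set s : Int := PySem.Int.floordiv A.sum 2 + 1 with hs
  set sN : Nat := s.toNat with hsN
  have hcast : (sN : Int) = s := Int.toNat_of_nonneg hs0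
  have hrange : PySem.List.pyRange 0 s = (List.range sN).map (fun k : Nat => (k : Int)) := by
    rw [← hcast, PySem.List.pyRange_zero_natCast]
  have hn : ((A.length : Int) + 1).toNat = A.length + 1 := by omega
  simp only [solve]
  rw [← hs]
  -- move from the Array-backed table to its list of rows
  have hbridge : ∀ (dp : Array (List (Option Int))) (x : Int),
      ((PySem.List.pyRange 1 ((A.length : Int) + 1)).foldl (fun dp j => solveBody A dp x j) dp).toList
        = (PySem.List.pyRange 1 ((A.length : Int) + 1)).foldl (fun dp j => solveBodyL A dp x j) dp.toList :=
    fun dp x => toList_foldl_bridge _ _ (fun dp' j => toList_solveBody A dp' x j) _ dp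
  rw [toList_foldl_bridge
    (fun dp i => (PySem.List.pyRange 1 ((A.length : Int) + 1)).foldl (fun dp j => solveBody A dp i j) dp)
    (fun dp i => (PySem.List.pyRange 1 ((A.length : Int) + 1)).foldl (fun dp j => solveBodyL A dp i j) dp)
    hbridge (PySem.List.pyRange 0 s) _, List.toList_toArray]
  rw [hrange]
  -- initial table
  have hdp0 : (List.map (fun k : Nat => (k : Int)) (List.range sN)).map
      (fun i => List.replicate ((A.length : Int) + 1).toNat (if i = 0 then (some 0 : Option Int) else none))
      = (List.range sN).map
          (fun r : Nat => List.replicate (A.length + 1) (if r = 0 then (some 0 : Option Int) else none)) := by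
    rw [List.map_map]
    exact List.map_congr_left (fun k _ => by simp [hn])
  rw [List.map_map] at hdp0 ⊢
  rw [hdp0, List.foldl_map]
  -- the filled table satisfies the invariant
  have hinv : InvT A sN sN
      ((List.range sN).foldl
        (fun dp (k : Nat) =>
          (PySem.List.pyRange 1 ((A.length : Int) + 1)).foldl
            (fun dp j => solveBodyL A dp ((k : Nat) : Int) j) dp)
        ((List.range sN).map
          (fun r : Nat => List.replicate (A.length + 1) (if r = 0 then (some 0 : Option Int) else none)))) := by
    apply foldlRangeInv (P := fun k dp => InvT A sN k dp)
    · refine ⟨by simp, ?_, ?_, ?_⟩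
      · intro r hr
        rw [PySem.List.getD_map_range _ sN r [] hr]
        simp
      · intro r hr
        omega
      · intro r _ hr
        rw [PySem.List.getD_map_range _ sN r [] hr]
    · intro k dp hk hInv
      have hinner : PySem.List.pyRange 1 ((A.length : Int) + 1)
          = (List.range A.length).map (fun t : Nat => 1 + (t : Int)) := by
        rw [PySem.List.pyRange_one]
        have he : (((A.length : Int) + 1) - 1).toNat = A.length := by omega
        rw [he]
      rw [hinner, List.foldl_map]
      apply inner_finish A sN k hk
      apply foldlRangeInv (P := fun m dp => InvInner A sN k m dp)
      · exact inner_start A sN k hk dp hInv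
      · intro m dp' hm hin
        exact inner_step A h0 sN k m hk hm dp' hin
  obtain ⟨h1, h2, h3, _⟩ := hinv
  rw [PySem.List.slice?_none_none_neg_one, Option.getD_some, scanRows_eq, List.map_reverse]
  have hmap : (List.map solveRowLast
      ((List.range sN).foldl
        (fun dp (k : Nat) =>
          (PySem.List.pyRange 1 ((A.length : Int) + 1)).foldl
            (fun dp j => solveBodyL A dp ((k : Nat) : Int) j) dp)
        ((List.range sN).map
          (fun r : Nat => List.replicate (A.length + 1) (if r = 0 then (some 0 : Option Int) else none)))))
      = WP A sN A.length := by
    set dpf := (List.range sN).foldl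
        (fun dp (k : Nat) =>
          (PySem.List.pyRange 1 ((A.length : Int) + 1)).foldl
            (fun dp j => solveBodyL A dp ((k : Nat) : Int) j) dp)
        ((List.range sN).map
          (fun r : Nat => List.replicate (A.length + 1) (if r = 0 then (some 0 : Option Int) else none))) with hdpf
    apply List.ext_getElem (by simp [h1, length_WP])
    intro r hr1 hr2
    have hrlt : r < sN := by
      have : (List.map solveRowLast dpf).length = sN := by simp [h1]
      omega
    have hrowget : dpf.getD r [] = dpf[r]'(by omega) := List.getD_eq_getElem dpf [] (by omega)
    have hrowlen : (dpf[r]'(by omega)).length = A.length + 1 := by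
      rw [← hrowget]; exact h2 r hrlt
    rw [List.getElem_map, rowLast_eq _ A.length hrowlen]
    have hent : entryT dpf r A.length = entryV (WP A sN A.length) r :=
      h3 r hrlt hrlt A.length le_rfl
    unfold entryT entryV at hent
    rw [hrowget] at hent
    rw [hent, List.getD_eq_getElem (WP A sN A.length) none (by rw [length_WP]; exact hrlt)]
  rw [hmap]

lemma s_nonpos_of_neg (A : List Int) (hneg : A.sum < 0) :
    PySem.Int.floordiv A.sum 2 + 1 ≤ 0 := by
  have h := (PySem.Int.floordiv_lt_iff_lt_mul (a := A.sum) (b := 2) (q := 0) (by norm_num)).2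
    (by simpa using hneg)
  omega

lemma solveA_neg (A : List Int) (hneg : A.sum < 0) : solve A = none := by
  simp only [solve]
  rw [PySem.List.pyRange_one_eq_nil (s_nonpos_of_neg A hneg)]
  simp [solveScanRows, PySem.List.slice?_none_none_neg_one]

-- ===== B-side lemmas =====

-- the column of the table, as the function the sparse dict realises
def colF (A : List Int) (sN c : Nat) (i : Int) : Option Int :=
  if 0 ≤ i ∧ i < (sN : Int) then entryV (WP A sN c) i.toNat else none

-- dict invariant after processing the first c elements
def InvD (A : List Int) (sN c : Nat) (d : PySem.Dict Int Int) : Prop :=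
  d.keys.Nodup ∧ ∀ i : Int, d.get? i = colF A sN c i

-- the per-key effect of one conditional update
def updD (old : Option Int) (cv : Int) : Option Int :=
  match old with
  | none => some (cv + 1)
  | some w => if cv + 1 < w then some (cv + 1) else some w

lemma bStep_nodup (s a : Int) (d : PySem.Dict Int Int) (tc : Int × Int)
    (h : d.keys.Nodup) : (bStep s a d tc).keys.Nodup := by
  unfold bStep
  split
  · exact PySem.Dict.nodup_keys_insert _ _ _ h
  · exact h

lemma foldl_bStep_nodup (s a : Int) :
    ∀ (L : List (Int × Int)) (d : PySem.Dict Int Int), d.keys.Nodup →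
      (L.foldl (bStep s a) d).keys.Nodup
  | [], _, h => h
  | tc :: t, d, h => foldl_bStep_nodup s a t _ (bStep_nodup s a d tc h)

lemma bStep_get?_ne (s a : Int) (d : PySem.Dict Int Int) (tc : Int × Int) (i : Int)
    (h : tc.1 + a ≠ i) : (bStep s a d tc).get? i = d.get? i := by
  unfold bStep
  split
  · exact PySem.Dict.get?_insert_of_ne d _ (fun he => h he.symm)
  · rfl

lemma foldl_bStep_untouched (s a : Int) :
    ∀ (L : List (Int × Int)) (d : PySem.Dict Int Int) (i : Int),
      (∀ p ∈ L, p.1 + a ≠ i) → (L.foldl (bStep s a) d).get? i = d.get? i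
  | [], _, _, _ => rfl
  | tc :: t, d, i, h => by
    rw [List.foldl_cons, foldl_bStep_untouched s a t _ i (fun p hp => h p (List.mem_cons_of_mem tc hp)),
      bStep_get?_ne s a d tc i (h tc List.mem_cons_self)]

lemma bStep_get?_self (s a : Int) (d : PySem.Dict Int Int) (t cv : Int) :
    (bStep s a d (t, cv)).get? (t + a) =
      if t + a < s then updD (d.get? (t + a)) cv else d.get? (t + a) := by
  unfold bStep
  by_cases hlt : t + a < s
  · rw [if_pos hlt]
    cases hg : d.get? (t + a) with
    | none =>
      have hcf : d.contains (t + a) = false := by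
        rw [PySem.Dict.contains_eq_isSome_get?, hg]; rfl
      rw [if_pos ⟨hlt, Or.inl hcf⟩]
      rw [PySem.Dict.get?_insert_self d _ _]
      rfl
    | some w =>
      by_cases hw : cv + 1 < w
      · rw [if_pos ⟨hlt, Or.inr (by rw [PySem.Dict.getD_eq_get?_getD, hg]; exact hw)⟩]
        rw [PySem.Dict.get?_insert_self d _ _]
        simp [updD, hw]
      · have hct : d.contains (t + a) = true := by
          rw [PySem.Dict.contains_eq_isSome_get?, hg]; rfl
        have hcond : ¬ (t + a < s ∧ (d.contains (t + a) = false ∨ cv + 1 < d.getD (t + a) 0)) := by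
          rw [PySem.Dict.getD_eq_get?_getD, hg]
          intro hc
          rcases hc.2 with h1 | h2
          · rw [hct] at h1; cases h1
          · exact hw h2
        rw [if_neg hcond, hg]
        simp [updD, hw]
  · have hcond : ¬ (t + a < s ∧ (d.contains (t + a) = false ∨ cv + 1 < d.getD (t + a) 0)) :=
      fun hc => hlt hc.1
    rw [if_neg hcond, if_neg hlt]

lemma foldl_bStep_touched (s a : Int) :
    ∀ (L : List (Int × Int)) (d : PySem.Dict Int Int) (t cv : Int),
      (L.map Prod.fst).Nodup → (t, cv) ∈ L →
      (L.foldl (bStep s a) d).get? (t + a) =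
        (if t + a < s then updD (d.get? (t + a)) cv else d.get? (t + a))
  | [], _, _, _, _, hmem => absurd hmem (List.not_mem_nil)
  | (t', cv') :: L', d, t, cv, hnd, hmem => by
    rw [List.map_cons, List.nodup_cons] at hnd
    rw [List.foldl_cons]
    rcases List.mem_cons.mp hmem with heq | hmem'
    · injection heq with h1 h2
      subst h1; subst h2
      rw [foldl_bStep_untouched s a L' _ (t + a) ?_, bStep_get?_self]
      intro p hp hpe
      have hpt : p.1 = t := by omega
      have hmemf : p.1 ∈ L'.map Prod.fst := List.mem_map_of_mem hp
      rw [hpt] at hmemf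
      exact hnd.1 hmemf
    · have hne : t' + a ≠ t + a := by
        intro he
        have : t' = t := by omega
        exact hnd.1 (this ▸ List.mem_map_of_mem hmem' : t' ∈ L'.map Prod.fst)
      rw [foldl_bStep_touched s a L' _ t cv hnd.2 hmem', bStep_get?_ne s a d _ _ hne]

-- items keys of a Nodup dict are exactly the get?-defined points
lemma get?_eq_some_of_mem_items (d : PySem.Dict Int Int) (hnd : d.keys.Nodup)
    (p : Int × Int) (hp : p ∈ d.items) : d.get? p.1 = some p.2 := by
  obtain ⟨k, v⟩ := p
  exact PySem.Dict.get?_of_mem_items d hp hnd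

-- one dict step realises one stepN column step
lemma InvD_step (A : List Int) (sN c : Nat) (s : Int) (hcast : (sN : Int) = s)
    (a : Int) (ha : 0 ≤ a) (d : PySem.Dict Int Int) (h : InvD A sN c d)
    (hc : c < A.length) (haeq : a = A.getD c 0) :
    InvD A sN (c + 1) (d.items.foldl (bStep s a) d) := by
  obtain ⟨hnd, hget⟩ := h
  have hkeys : d.items.map Prod.fst = d.keys := rfl
  refine ⟨foldl_bStep_nodup s a d.items d hnd, ?_⟩
  intro i
  have hWlen : (WP A sN c).length = sN := length_WP A sN c
  -- value of the fold at i
  have hres : (d.items.foldl (bStep s a) d).get? i =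
      (match d.get? (i - a) with
       | some cv => if i < s then updD (d.get? i) cv else d.get? i
       | none => d.get? i) := by
    cases hg : d.get? (i - a) with
    | none =>
      apply foldl_bStep_untouched
      intro p hp hpe
      have := get?_eq_some_of_mem_items d hnd p hp
      rw [(by omega : p.1 = i - a), hg] at this
      cases this
    | some cv =>
      have hmem : (i - a, cv) ∈ d.items := PySem.Dict.mem_items_of_get?_eq_some d hg
      have := foldl_bStep_touched s a d.items d (i - a) cv (hkeys ▸ hnd) hmem
      rw [(by omega : i - a + a = i)] at this
      rw [this]
  rw [hres, hget i, hget (i - a)]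
  -- now compare with colF at c+1, by cases on the two old entries
  have hWs : ∀ hiN : i.toNat < sN, entryV (WP A sN (c + 1)) i.toNat
      = pickP (WP A sN c) (sN : Int) (i.toNat : Int) a := by
    intro hiN
    rw [WP_succ A sN c hc, ← haeq, entryV_stepN sN (WP A sN c) a i.toNat hiN]
  by_cases hia2 : 0 ≤ i - a ∧ i - a < (sN : Int)
  · have hcolp : colF A sN c (i - a) = entryV (WP A sN c) (i - a).toNat := by
      unfold colF; rw [if_pos hia2]
    rw [hcolp]
    cases hprev : entryV (WP A sN c) (i - a).toNat with
    | none =>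
      show colF A sN c i = colF A sN (c + 1) i
      unfold colF
      by_cases hi : 0 ≤ i ∧ i < (sN : Int)
      · rw [if_pos hi, if_pos hi, hWs (by omega)]
        have hicast : ((i.toNat : Nat) : Int) = i := by omega
        rw [pickP_char (WP A sN c) sN i.toNat a hWlen ha (by omega), hicast,
          if_pos (by omega : (0:Int) ≤ i - a), hprev]
        cases hcur : entryV (WP A sN c) i.toNat <;> simp [pymin]
      · rw [if_neg hi, if_neg hi]
    | some cv =>
      show (if i < s then updD (colF A sN c i) cv else colF A sN c i) = colF A sN (c + 1) i
      by_cases hi : 0 ≤ i ∧ i < (sN : Int)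
      · have hclt : i < s := by omega
        rw [if_pos hclt]
        have hcoli : colF A sN c i = entryV (WP A sN c) i.toNat := by
          unfold colF; rw [if_pos hi]
        rw [hcoli]
        have hcoli' : colF A sN (c + 1) i = entryV (WP A sN (c + 1)) i.toNat := by
          unfold colF; rw [if_pos hi]
        rw [hcoli', hWs (by omega)]
        have hicast : ((i.toNat : Nat) : Int) = i := by omega
        rw [pickP_char (WP A sN c) sN i.toNat a hWlen ha (by omega), hicast,
          if_pos (by omega : (0:Int) ≤ i - a), hprev]
        cases hcur : entryV (WP A sN c) i.toNat with
        | none => simp [pymin, updD]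
        | some w =>
          simp only [pymin, updD, Option.map_some]
          by_cases hw : cv + 1 < w
          · rw [if_pos hw]
            simp [min_eq_right (le_of_lt hw)]
          · rw [if_neg hw]
            simp [min_eq_left (by omega : w ≤ cv + 1)]
      · -- i out of range yet i - a in range and i < s is impossible (a ≥ 0, s = sN)
        have hnlt : ¬ i < s := by omega
        rw [if_neg hnlt]
        show colF A sN c i = colF A sN (c + 1) i
        unfold colF
        rw [if_neg hi, if_neg hi]
  · have hcolp : colF A sN c (i - a) = none := by
      unfold colF; rw [if_neg hia2]
    rw [hcolp]
    show colF A sN c i = colF A sN (c + 1) i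
    unfold colF
    by_cases hi : 0 ≤ i ∧ i < (sN : Int)
    · rw [if_pos hi, if_pos hi, hWs (by omega)]
      have hicast : ((i.toNat : Nat) : Int) = i := by omega
      have hnia : ¬ (0 : Int) ≤ i - a := by omega
      rw [pickP_char (WP A sN c) sN i.toNat a hWlen ha (by omega), hicast, if_neg hnia]
    · rw [if_neg hi, if_neg hi]

-- the invariant carried through the whole fold over A
lemma InvD_all (A : List Int) (h0 : ∀ a ∈ A, 0 ≤ a) (sN : Nat) (s : Int) (hcast : (sN : Int) = s)
    (hpos : 0 < sN) :
    ∀ (c : Nat), c ≤ A.length →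
      InvD A sN c ((A.take c).foldl (fun reach a => reach.items.foldl (bStep s a) reach)
        (PySem.Dict.empty.insert 0 0)) := by
  intro c
  induction c with
  | zero =>
    intro _
    refine ⟨?_, ?_⟩
    · simp only [List.take_zero, List.foldl_nil]
      exact PySem.Dict.nodup_keys_insert _ _ _ PySem.Dict.nodup_keys_empty
    · intro i
      simp only [List.take_zero, List.foldl_nil]
      rw [PySem.Dict.get?_insert, PySem.Dict.get?_empty]
      unfold colF
      by_cases hi : i = 0
      · subst hi
        rw [if_pos rfl, if_pos ⟨le_refl 0, by omega⟩, WP_zero]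
        show some 0 = entryV (vinit sN) 0
        rw [entryV_vinit sN 0 hpos]
        rfl
      · rw [if_neg hi]
        by_cases hrange : 0 ≤ i ∧ i < (sN : Int)
        · rw [if_pos hrange, WP_zero, entryV_vinit sN i.toNat (by omega)]
          rw [if_neg (by omega : ¬ i.toNat = 0)]
        · rw [if_neg hrange]
  | succ c ih =>
    intro hc1
    have hc : c < A.length := by omega
    have ha : 0 ≤ A.getD c 0 := by
      have hmem : A.getD c 0 ∈ A := by
        rw [List.getD_eq_getElem?_getD, List.getElem?_eq_getElem hc]
        exact List.getElem_mem hc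
      exact h0 _ hmem
    have hsplit : (A.take (c + 1)).foldl (fun reach a => reach.items.foldl (bStep s a) reach)
        (PySem.Dict.empty.insert 0 0)
        = (fun reach a => reach.items.foldl (bStep s a) reach)
            ((A.take c).foldl (fun reach a => reach.items.foldl (bStep s a) reach)
              (PySem.Dict.empty.insert 0 0)) (A.getD c 0) := by
      rw [List.take_add_one, List.getElem?_eq_getElem hc, Option.toList_some, List.foldl_append]
      simp [List.getD_eq_getElem?_getD, List.getElem?_eq_getElem hc]
    rw [hsplit]
    exact InvD_step A sN c s hcast (A.getD c 0) ha _ (ih (by omega)) hc rfl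

-- sum 0 is always reachable with 0 flips
lemma entryV_WP_zero (A : List Int) (h0 : ∀ a ∈ A, 0 ≤ a) (sN : Nat) (hpos : 0 < sN) :
    ∀ (c : Nat), c ≤ A.length → entryV (WP A sN c) 0 = some 0 := by
  intro c
  induction c with
  | zero =>
    intro _
    rw [WP_zero, entryV_vinit sN 0 hpos]
    rfl
  | succ c ih =>
    intro hc1
    have hc : c < A.length := by omega
    have ha : 0 ≤ A.getD c 0 := by
      have hmem : A.getD c 0 ∈ A := by
        rw [List.getD_eq_getElem?_getD, List.getElem?_eq_getElem hc]
        exact List.getElem_mem hc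
      exact h0 _ hmem
    rw [WP_succ A sN c hc, entryV_stepN sN _ _ 0 hpos]
    have h00 : pickP (WP A sN c) (sN : Int) ((0 : Nat) : Int) (A.getD c 0)
        = pickP (WP A sN c) (sN : Int) (Int.ofNat 0) (A.getD c 0) := rfl
    rw [pickP_char (WP A sN c) sN 0 (A.getD c 0) (length_WP A sN c) ha hpos]
    rcases eq_or_lt_of_le ha with heq | hgt
    · rw [if_pos (by omega : (0:Int) ≤ ((0:Nat):Int) - A.getD c 0)]
      rw [ih (by omega)]
      have : (((0:Nat):Int) - A.getD c 0).toNat = 0 := by omega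
      rw [this, ih (by omega)]
      simp [pymin]
    · rw [if_neg (by omega : ¬ (0:Int) ≤ ((0:Nat):Int) - A.getD c 0)]
      exact ih (by omega)

-- first some from the back: the reversed scan finds the entry at the largest defined index
lemma reverse_findSome_eq (w : Int) :
    ∀ (v : List (Option Int)) (k : Nat), k < v.length → v.getD k none = some w →
      (∀ r, k < r → r < v.length → v.getD r none = none) →
      v.reverse.findSome? id = some w := by
  intro v
  induction v using List.reverseRecOn with
  | nil =>
    intro k hk
    simp at hk
  | append_singleton xs x ih =>
    intro k hk hw hnone
    rw [List.reverse_append, List.reverse_singleton, List.singleton_append, List.findSome?_cons]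
    rcases Nat.lt_or_ge k xs.length with hlt | hge
    · have hx : x = none := by
        have := hnone xs.length (by omega) (by simp)
        rwa [List.getD_eq_getElem?_getD, List.getElem?_append_right (le_refl xs.length),
          Nat.sub_self, List.getElem?_singleton, if_pos rfl, Option.getD_some] at this
      rw [hx]
      simp only [id]
      apply ih k hlt
      · have hw' : (xs ++ [x])[k]? = xs[k]? := List.getElem?_append_left hlt
        rw [List.getD_eq_getElem?_getD, ← hw', ← List.getD_eq_getElem?_getD]
        exact hw
      · intro r hr1 hr2
        have := hnone r hr1 (by simp; omega)
        rwa [List.getD_eq_getElem?_getD, List.getElem?_append_left hr2,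
          ← List.getD_eq_getElem?_getD] at this
    · have hkx : k = xs.length := by
        simp only [List.length_append, List.length_singleton] at hk
        omega
      have hx : x = some w := by
        rw [hkx, List.getD_eq_getElem?_getD, List.getElem?_append_right (le_refl xs.length),
          Nat.sub_self, List.getElem?_singleton, if_pos rfl, Option.getD_some] at hw
        exact hw
      rw [hx]
      rfl

lemma solveB_eq (A : List Int) (h0 : ∀ a ∈ A, 0 ≤ a)
    (hs1 : 1 ≤ PySem.Int.floordiv A.sum 2 + 1) :
    solve_alt A = ((WP A (PySem.Int.floordiv A.sum 2 + 1).toNat A.length).reverse).findSome? id := by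
  set s : Int := PySem.Int.floordiv A.sum 2 + 1 with hs
  set sN : Nat := s.toNat with hsN
  have hcast : (sN : Int) = s := Int.toNat_of_nonneg (by omega)
  have hpos : 0 < sN := by omega
  simp only [solve_alt]
  rw [← hs, if_neg (by omega : ¬ s ≤ 0)]
  have hfold : A.foldl (fun reach a => reach.items.foldl (bStep s a) reach)
      (PySem.Dict.empty.insert 0 0)
      = (A.take A.length).foldl (fun reach a => reach.items.foldl (bStep s a) reach)
          (PySem.Dict.empty.insert 0 0) := by
    rw [List.take_length]
  obtain ⟨hnd, hget⟩ := InvD_all A h0 sN s hcast hpos A.length (le_refl _)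
  rw [hfold]
  set reach := (A.take A.length).foldl (fun reach a => reach.items.foldl (bStep s a) reach)
      (PySem.Dict.empty.insert 0 0) with hreach
  -- 0 is a key
  have h00 : reach.get? 0 = some 0 := by
    rw [hget 0]
    unfold colF
    rw [if_pos ⟨le_refl 0, by omega⟩]
    have := entryV_WP_zero A h0 sN hpos A.length (le_refl _)
    simpa using this
  have h0mem : (0 : Int) ∈ reach.keys := by
    by_contra hmem
    rw [(PySem.Dict.get?_eq_none_iff_not_mem_keys _ _).mpr hmem] at h00
    cases h00
  have hkeysne : reach.keys ≠ [] := fun he => by rw [he] at h0mem; exact List.not_mem_nil h0mem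
  -- the max key
  cases hmax : PySem.List.max? reach.keys (fun x => x) with
  | none => exact absurd ((PySem.List.max?_eq_none_iff _ _).mp hmax) hkeysne
  | some m =>
    have hmmem : m ∈ reach.keys := PySem.List.max?_mem hmax
    have hmsome : ∃ w, reach.get? m = some w := by
      cases hg : reach.get? m with
      | none => exact absurd ((PySem.Dict.get?_eq_none_iff_not_mem_keys _ _).mp hg) (fun h => h hmmem)
      | some w => exact ⟨w, rfl⟩
    obtain ⟨w, hw⟩ := hmsome
    have hcolm := (hget m).symm.trans hw
    unfold colF at hcolm
    have hmrange : 0 ≤ m ∧ m < (sN : Int) := by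
      by_contra hr
      rw [if_neg hr] at hcolm
      cases hcolm
    rw [if_pos hmrange] at hcolm
    rw [Option.bind_some, hw]
    symm
    apply reverse_findSome_eq w (WP A sN A.length) m.toNat (by rw [length_WP]; omega) hcolm
    intro r hr1 hr2
    rw [length_WP] at hr2
    by_contra hne
    have hsome : ∃ v, entryV (WP A sN A.length) r = some v := by
      cases hx : entryV (WP A sN A.length) r with
      | none => exact absurd (by unfold entryV at hx; exact hx) hne
      | some v => exact ⟨v, rfl⟩
    obtain ⟨v, hv⟩ := hsome
    have hgr : reach.get? (r : Int) = some v := by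
      rw [hget (r : Int)]
      unfold colF
      rw [if_pos ⟨by omega, by omega⟩]
      simpa using hv
    have hrmem : (r : Int) ∈ reach.keys := by
      by_contra hmemr
      rw [(PySem.Dict.get?_eq_none_iff_not_mem_keys _ _).mpr hmemr] at hgr
      cases hgr
    have := PySem.List.max?_isMax hmax (r : Int) hrmem
    simp only at this
    omega

-- ===== VERDICT (by name: the statement is the Claim_ definition above) =====
theorem solve_spec : Claim_equal_solve := by
  intro A _ hpre
  unfold Spec_solve
  rcases hpre with h0 | hneg
  · have hs1 : 1 ≤ PySem.Int.floordiv A.sum 2 + 1 := by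
      have hsum : 0 ≤ A.sum := List.sum_nonneg h0
      have := (PySem.Int.le_floordiv_iff_mul_le (a := A.sum) (b := 2) (q := 0) (by norm_num)).2
        (by simpa using hsum)
      omega
    rw [solveA_eq A h0 (by omega), solveB_eq A h0 hs1]
  · rw [solveA_neg A hneg]
    simp only [solve_alt]
    rw [if_pos (s_nonpos_of_neg A hneg)]
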